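-- pv_equiv track=rewrite | github.com/kmskpraveen/plagarism-project | 123.py | lcschecker
-- ===== SOURCE A (Python) =====
-- def lcschecker(M,N):
-- 	c = 0
-- 	l1 = len(M)
-- 	l2 = len(N)
-- 	for i in M:
-- 		for j in N:
-- 			if i == j:
-- 				if len(i)>c:
-- 					c = len(i)
-- 	return c
-- ===== SOURCE B (Python) =====
-- def lcschecker(M, N):
--     common = set(M) & set(N)
--     return max((len(s) for s in common), default=0)
-- ===== Notes on version B (the rewrite author's own statement) =====
-- stated objective: idiomatic
-- what changed: Replaces A's nested pair-scan with per-match max-tracking by a one-shot set intersection followed by a single max pass over the common elements.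
import Mathlib
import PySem

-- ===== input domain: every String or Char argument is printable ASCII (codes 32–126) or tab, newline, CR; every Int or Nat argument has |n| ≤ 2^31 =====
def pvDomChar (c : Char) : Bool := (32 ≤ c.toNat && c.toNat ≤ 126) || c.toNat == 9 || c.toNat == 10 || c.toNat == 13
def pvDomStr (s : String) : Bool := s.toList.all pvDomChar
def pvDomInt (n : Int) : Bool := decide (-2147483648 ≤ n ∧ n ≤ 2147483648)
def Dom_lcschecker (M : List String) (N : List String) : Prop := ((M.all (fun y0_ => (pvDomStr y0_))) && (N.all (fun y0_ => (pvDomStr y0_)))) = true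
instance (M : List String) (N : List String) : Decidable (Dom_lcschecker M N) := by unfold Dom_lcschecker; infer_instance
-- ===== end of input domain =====

-- B replaces A's nested pair-scan with a one-shot set intersection and a single max pass (idiomatic, O(|M|+|N|) vs O(|M|*|N|)).
-- ===== PORT A =====
def lcschecker (M : List String) (N : List String) : Int :=
  let c : Int := 0
  let _l1 := PySem.List.len M
  let _l2 := PySem.List.len N
  M.foldl (fun c i =>
    N.foldl (fun c j =>
      if i == j then
        (if PySem.Str.len i > c then PySem.Str.len i else c)
      else c) c) c

-- ===== PORT B =====
-- max(gen, default=0): exact as foldl max 0 since every len ≥ 0, and the result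
-- does not depend on the set's iteration order (max is commutative/associative).
def lcschecker_alt (M : List String) (N : List String) : Int :=
  let common : PySem.Set String := PySem.Set.inter (PySem.Set.ofList M) (PySem.Set.ofList N)
  common.foldl (fun c s => max c (PySem.Str.len s)) 0

-- ===== PRECONDITION & SPEC =====
def Spec_lcschecker (M : List String) (N : List String) (out : Int) : Prop := out = lcschecker_alt M N
instance (M : List String) (N : List String) (out : Int) : Decidable (Spec_lcschecker M N out) := by unfold Spec_lcschecker; infer_instance

-- ===== CLAIM (what is proved, stated in full; the proofs are below) =====
def Claim_equal_lcschecker : Prop := ∀ (M : List String) (N : List String), Dom_lcschecker M N → Spec_lcschecker M N (lcschecker M N)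

-- ===== LEMMAS AND PROOFS =====

-- ===== VERDICT (by name: the statement is the Claim_ definition above) =====
-- abbreviations used only by the proofs
def gN (s : String) : Nat := s.toList.length

def Fm (l : List String) (c : Int) : Int := l.foldl (fun c s => max c (PySem.Str.len s)) c

theorem len_eq_gN (s : String) : PySem.Str.len s = (gN s : Int) := by
  simp [gN, pysem]

theorem inner_loop (N : List String) (i : String) : ∀ (c : Int),
    N.foldl (fun c j => if i == j then
        (if PySem.Str.len i > c then PySem.Str.len i else c) else c) c
    = if i ∈ N then max c (PySem.Str.len i) else c := by
  induction N with
  | nil => intro c; simp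
  | cons j t ih =>
    intro c
    simp only [List.foldl_cons, List.mem_cons]
    by_cases h : i = j
    · subst h
      simp only [beq_self_eq_true, if_pos, ih]
      have : (if PySem.Str.len i > c then PySem.Str.len i else c) = max c (PySem.Str.len i) := by
        split <;> omega
      rw [this]
      by_cases hm : i ∈ t <;> simp [hm]
    · have : (i == j) = false := by simp [h]
      rw [this]
      simp only [Bool.false_eq_true, if_false, ih]
      simp [h]

theorem outer_as_filter (M N : List String) :
    M.foldl (fun c i => if i ∈ N then max c (PySem.Str.len i) else c) 0
    = Fm (M.filter (fun i => decide (i ∈ N))) 0 := by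
  rw [Fm, ← PySem.List.foldl_ite_eq_foldl_filter]

theorem Fm_eq_sup (l : List String) : ∀ (c : Int), 0 ≤ c →
    Fm l c = max c ((l.toFinset.sup gN : Nat) : Int) := by
  induction l with
  | nil => intro c hc; simp [Fm]; omega
  | cons a t ih =>
    intro c hc
    have h1 : Fm (a :: t) c = Fm t (max c (PySem.Str.len a)) := rfl
    rw [h1, ih _ (by have := len_eq_gN a; omega)]
    simp only [List.toFinset_cons, Finset.sup_insert, len_eq_gN]
    have : ((gN a ⊔ t.toFinset.sup gN : Nat) : Int) = max (gN a : Int) ((t.toFinset.sup gN : Nat) : Int) := by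
      push_cast; rfl
    rw [this]
    omega

theorem common_toFinset (M N : List String) :
    (PySem.Set.inter (PySem.Set.ofList M) (PySem.Set.ofList N)).toFinset
    = (M.filter (fun i => decide (i ∈ N))).toFinset := by
  ext x
  simp [PySem.Set.mem_inter, PySem.Set.mem_ofList]

theorem lcschecker_spec : Claim_equal_lcschecker := by
  intro M N _
  unfold Spec_lcschecker lcschecker lcschecker_alt
  simp only []
  have h1 : ∀ c0 : Int, M.foldl (fun c i =>
      N.foldl (fun c j => if i == j then
        (if PySem.Str.len i > c then PySem.Str.len i else c) else c) c) c0
      = M.foldl (fun c i => if i ∈ N then max c (PySem.Str.len i) else c) c0 := by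
    intro c0
    apply PySem.List.foldl_congr_mem
    intro acc i _
    exact inner_loop N i acc
  rw [h1, outer_as_filter,
      Fm_eq_sup _ 0 le_rfl,
      show (PySem.Set.inter (PySem.Set.ofList M) (PySem.Set.ofList N)).foldl
            (fun c s => max c (PySem.Str.len s)) 0
          = Fm (PySem.Set.inter (PySem.Set.ofList M) (PySem.Set.ofList N)) 0 from rfl,
      Fm_eq_sup _ 0 le_rfl, common_toFinset]
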